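-- pv_equiv track=rewrite | github.com/opendatalab/OmniDocBench | src/metrics/cdm/modules/tokenize_latex/parse_guard.py | braces_balanced
-- ===== SOURCE A (Python) =====
-- def braces_balanced(line: str) -> bool:
--     depth = 0
--     idx = 0
--     while idx < len(line):
--         ch = line[idx]
--         if ch == "\\" and idx + 1 < len(line) and line[idx + 1] in "{}[]()":
--             idx += 2
--             continue
--         if ch == "{":
--             depth += 1
--         elif ch == "}":
--             depth -= 1
--             if depth < 0:
--                 return False
--         idx += 1
--     return depth == 0
-- ===== SOURCE B (Python) =====
-- def braces_balanced(line: str) -> bool: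
--     # pass 1: drop every escaped bracket pair "\X" (X one of {}[]()) left-to-right
--     cleaned = []
--     skip = False
--     for i, ch in enumerate(line):
--         if skip:
--             skip = False
--             continue
--         if ch == "\\" and i + 1 < len(line) and line[i + 1] in "{}[]()":
--             skip = True
--             continue
--         cleaned.append(ch)
--     # pass 2: running depth over the cleaned text
--     depth = 0
--     for ch in cleaned:
--         if ch == "{":
--             depth += 1
--         elif ch == "}":
--             depth -= 1
--             if depth < 0:
--                 return False
--     return depth == 0
-- ===== Notes on version B (the rewrite author's own statement) =====
-- stated objective: simpler
-- what changed: Replaces A's single fused escape-and-count while-loop over indices with a normalize-then-scan decomposition: one pass strips escaped brackets, a second pass just tracks brace depth.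
import Mathlib
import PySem

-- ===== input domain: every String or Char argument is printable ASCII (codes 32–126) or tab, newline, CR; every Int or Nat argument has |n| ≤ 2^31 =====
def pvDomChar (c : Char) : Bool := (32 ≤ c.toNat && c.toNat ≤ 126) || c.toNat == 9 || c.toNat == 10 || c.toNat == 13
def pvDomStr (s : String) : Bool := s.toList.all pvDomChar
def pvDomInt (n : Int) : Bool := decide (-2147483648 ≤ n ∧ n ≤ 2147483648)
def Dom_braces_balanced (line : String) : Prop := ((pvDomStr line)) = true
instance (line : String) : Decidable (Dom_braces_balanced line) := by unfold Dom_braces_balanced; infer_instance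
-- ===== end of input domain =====

-- B replaces A's fused escape-and-count loop with a normalize-then-scan decomposition (same cost, simpler).


-- ===== PORT A =====
-- "line[idx + 1] in \"{}[]()\""
def pvIsBr (c : Char) : Bool := c = '{' || c = '}' || c = '[' || c = ']' || c = '(' || c = ')'

-- A's while loop over idx, as structural recursion on the remaining characters
def pvALoop : List Char → Int → Bool
  | [], depth => depth == 0
  | '\\' :: c2 :: rest2, depth =>
      if pvIsBr c2 then pvALoop rest2 depth
      else pvALoop (c2 :: rest2) depth   -- '\' is neither '{' nor '}': idx += 1
  | c :: rest, depth =>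
      if c = '{' then pvALoop rest (depth + 1)
      else if c = '}' then (if depth - 1 < 0 then false else pvALoop rest (depth - 1))
      else pvALoop rest depth

def braces_balanced (line : String) : Bool := pvALoop line.toList 0

-- ===== PORT B =====
-- pass 1 of Source B: drop every escaped bracket pair
def pvClean : List Char → List Char
  | [] => []
  | '\\' :: c2 :: rest2 =>
      if pvIsBr c2 then pvClean rest2
      else '\\' :: pvClean (c2 :: rest2)
  | c :: rest => c :: pvClean rest

-- pass 2 of Source B: running depth over the cleaned text
def pvBLoop : List Char → Int → Bool
  | [], depth => depth == 0
  | c :: rest, depth =>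
      if c = '{' then pvBLoop rest (depth + 1)
      else if c = '}' then (if depth - 1 < 0 then false else pvBLoop rest (depth - 1))
      else pvBLoop rest depth

def braces_balanced_alt (line : String) : Bool := pvBLoop (pvClean line.toList) 0

-- ===== PRECONDITION & SPEC =====
def Spec_braces_balanced (line : String) (out : Bool) : Prop := out = braces_balanced_alt line
instance (line : String) (out : Bool) : Decidable (Spec_braces_balanced line out) := by unfold Spec_braces_balanced; infer_instance

-- ===== CLAIM (what is proved, stated in full; the proofs are below) =====
def Claim_equal_braces_balanced : Prop := ∀ (line : String), Dom_braces_balanced line → Spec_braces_balanced line (braces_balanced line)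

-- ===== LEMMAS AND PROOFS =====
lemma pvALoop_eq_pvBLoop_clean (cs : List Char) (d : Int) :
    pvALoop cs d = pvBLoop (pvClean cs) d := by
  fun_induction pvALoop cs d
  all_goals simp_all [pvClean, pvBLoop]

-- ===== VERDICT (by name: the statement is the Claim_ definition above) =====
theorem braces_balanced_spec : Claim_equal_braces_balanced := by
  intro line _
  unfold Spec_braces_balanced braces_balanced braces_balanced_alt
  exact pvALoop_eq_pvBLoop_clean _ _
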